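-- pv_equiv track=rewrite | github.com/jjanon-git/nl2api | tests/unit/nl2api/fixture_loader.py | extract_ticker_symbol
-- ===== SOURCE A (Python) =====
-- def extract_ticker_symbol(ticker: str) -> str:
--     """
--     Extract the base symbol from a ticker in various formats.
--
--     Examples:
--         @AAPL -> AAPL
--         U:MSFT -> MSFT
--         AAPL.O -> AAPL
--         J:6758 -> 6758
--     """
--     # Remove common prefixes
--     prefixes = ["@", "U:", "C:", "D:", "J:", "K:", "H:"]
--     for prefix in prefixes:
--         if ticker.startswith(prefix):
--             ticker = ticker[len(prefix) :]
--             break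
--
--     # Remove common suffixes (.O, .N, .L, etc.)
--     if "." in ticker:
--         ticker = ticker.split(".")[0]
--
--     return ticker
-- ===== SOURCE B (Python) =====
-- def extract_ticker_symbol(ticker: str) -> str:
--     """
--     Extract the base symbol from a ticker in various formats.
--
--     Idiomatic rewrite: decide the prefix by direct character tests
--     (no loop over a prefix table), then cut at the first dot with a
--     single partition() scan instead of building every split piece.
--     """
--     if ticker[:1] == "@":
--         body = ticker[1:]
--     elif ticker[1:2] == ":" and ticker[0] in "UCDJKH":
--         body = ticker[2:]
--     else:
--         body = ticker
--     return body.partition(".")[0]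
-- ===== Notes on version B (the rewrite author's own statement) =====
-- stated objective: idiomatic
-- what changed: B replaces A's loop over a 7-entry prefix table by direct character tests (one slice comparison per case) and A's full split('.') list construction by a single partition-style cut at the first dot.
import Mathlib
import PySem

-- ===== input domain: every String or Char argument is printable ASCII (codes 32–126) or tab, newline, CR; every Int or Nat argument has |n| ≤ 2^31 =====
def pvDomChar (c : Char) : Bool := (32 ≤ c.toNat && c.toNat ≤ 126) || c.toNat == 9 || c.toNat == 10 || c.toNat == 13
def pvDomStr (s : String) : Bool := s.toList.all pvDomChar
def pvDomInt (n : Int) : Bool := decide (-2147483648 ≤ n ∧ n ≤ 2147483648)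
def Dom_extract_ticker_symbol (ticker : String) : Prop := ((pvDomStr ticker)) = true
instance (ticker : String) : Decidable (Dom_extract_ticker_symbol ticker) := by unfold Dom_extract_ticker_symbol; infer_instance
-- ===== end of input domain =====

-- B replaces A's loop over a prefix table and its full split('.') by direct
-- character tests for the prefix and a single cut at the first dot (idiomatic).

-- ===== PORT A =====
-- the 'for prefix in prefixes: if ticker.startswith(prefix): ticker = ticker[len(prefix):]; break' loop
def pvStripPrefixA : List String → String → String
  | [], t => t
  | p :: ps, t =>
    if PySem.Str.startswith t p then PySem.Str.slice t (some (PySem.Str.len p)) none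
    else pvStripPrefixA ps t

def extract_ticker_symbol (ticker : String) : String :=
  let t := pvStripPrefixA ["@", "U:", "C:", "D:", "J:", "K:", "H:"] ticker
  if PySem.Str.isIn "." t then
    -- t.split(".")[0]; '.' ≠ "" so split? is some, and a split list is never
    -- empty, so Python's [0] never raises: the getD/headD defaults are dead.
    ((PySem.Str.split? t ".").getD []).headD ""
  else t

-- ===== PORT B =====
-- the if/elif chain of Source B: ticker[:1] == "@" / (ticker[1:2] == ":" and ticker[0] in "UCDJKH")
def pvBodyB (cs : List Char) : List Char :=
  if cs.take 1 = ['@'] then cs.drop 1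
  else if (cs.drop 1).take 1 = [':'] ∧ ['U', 'C', 'D', 'J', 'K', 'H'].contains (cs.headD ' ') then
    -- headD's default is dead: the first conjunct forces cs to have ≥ 2 chars
    cs.drop 2
  else cs

def extract_ticker_symbol_alt (ticker : String) : String :=
  -- body.partition(".")[0]: everything before the first '.'
  String.ofList ((pvBodyB ticker.toList).takeWhile (fun ch => ch != '.'))

-- ===== PRECONDITION & SPEC =====
def Spec_extract_ticker_symbol (ticker : String) (out : String) : Prop := out = extract_ticker_symbol_alt ticker
instance (ticker : String) (out : String) : Decidable (Spec_extract_ticker_symbol ticker out) := by unfold Spec_extract_ticker_symbol; infer_instance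

-- ===== CLAIM (what is proved, stated in full; the proofs are below) =====
def Claim_equal_extract_ticker_symbol : Prop := ∀ (ticker : String), Dom_extract_ticker_symbol ticker → Spec_extract_ticker_symbol ticker (extract_ticker_symbol ticker)

-- ===== LEMMAS AND PROOFS =====

-- A's split loop: pushing pieces onto acc only prepends acc.reverse to the result
lemma pv_go_acc (sep : List Char) (fuel : Nat) : ∀ (l cur : List Char) (acc : List (List Char)),
    PySem.Chars.splitOn.go sep fuel l cur acc = acc.reverse ++ PySem.Chars.splitOn.go sep fuel l cur [] := by
  induction fuel with
  | zero => intro l cur acc; simp [PySem.Chars.splitOn.go]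
  | succ f ih =>
    intro l cur acc
    cases l with
    | nil => simp [PySem.Chars.splitOn.go]
    | cons c rest =>
      by_cases h : sep.isPrefixOf (c :: rest) = true
      · simp only [PySem.Chars.splitOn.go, h, if_true]
        rw [ih, ih (List.drop sep.length (c :: rest)) [] [cur.reverse]]
        simp
      · simp only [PySem.Chars.splitOn.go, h, if_false, Bool.false_eq_true]
        exact ih rest (c :: cur) acc

-- the first piece of a split on "." is everything before the first dot
lemma pv_go_head : ∀ (fuel : Nat) (l cur : List Char), l.length ≤ fuel →
    (PySem.Chars.splitOn.go ['.'] fuel l cur []).headD [] =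
      cur.reverse ++ l.takeWhile (fun c => c != '.') := by
  intro fuel
  induction fuel with
  | zero =>
    intro l cur hl
    have : l = [] := List.length_eq_zero_iff.mp (Nat.le_zero.mp hl)
    subst this
    simp [PySem.Chars.splitOn.go]
  | succ f ih =>
    intro l cur hl
    cases l with
    | nil => simp [PySem.Chars.splitOn.go]
    | cons c rest =>
      by_cases h : c = '.'
      · subst h
        have hp : List.isPrefixOf ['.'] ('.' :: rest) = true := by
          simp [List.isPrefixOf]
        simp only [PySem.Chars.splitOn.go, hp, if_true]
        rw [pv_go_acc]
        simp [List.takeWhile]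
      · have hp : ¬ (List.isPrefixOf ['.'] (c :: rest) = true) := by
          simp [List.isPrefixOf]
          exact fun hc => h hc.symm
        simp only [PySem.Chars.splitOn.go, hp, Bool.false_eq_true, if_false]
        rw [ih rest (c :: cur) (by simpa using Nat.succ_le_succ_iff.mp hl)]
        have hc : (c != '.') = true := by simp [h]
        simp [List.takeWhile, hc]

lemma pv_splitOn_head (cs : List Char) :
    (PySem.Chars.splitOn cs ['.']).headD [] = cs.takeWhile (fun c => c != '.') := by
  unfold PySem.Chars.splitOn
  simpa using pv_go_head (cs.length + 1) cs [] (by omega)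

lemma pv_singleton_infix {c : Char} {t : List Char} : [c] <:+: t ↔ c ∈ t := by
  constructor
  · intro h; exact (List.singleton_sublist).mp h.sublist
  · intro h
    obtain ⟨s, u, rfl⟩ := List.append_of_mem h
    exact ⟨s, u, by simp⟩

lemma pv_map_ofList_headD (l : List (List Char)) :
    (l.map String.ofList).headD "" = String.ofList (l.headD []) := by
  cases l <;> rfl

-- the dot-cutting halves agree: A's 'if "." in t: t = t.split(".")[0]' cuts at the first dot
lemma pv_dot_part (t : String) :
    (if PySem.Str.isIn "." t then ((PySem.Str.split? t ".").getD []).headD "" else t) =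
      String.ofList (t.toList.takeWhile (fun ch => ch != '.')) := by
  by_cases h : PySem.Str.isIn "." t = true
  · rw [if_pos h]
    have hs : PySem.Str.split? t "." =
        some ((PySem.Chars.splitOn t.toList ['.']).map String.ofList) := by
      simp [PySem.Str.split?, PySem.Chars.split?]
    rw [hs]
    simp only [Option.getD_some]
    rw [pv_map_ofList_headD, pv_splitOn_head]
  · rw [if_neg h]
    have hnot : ('.' : Char) ∉ t.toList := by
      intro hmem
      exact h ((PySem.Str.isIn_iff_infix "." t).mpr (pv_singleton_infix.mpr hmem))
    have : t.toList.takeWhile (fun ch => ch != '.') = t.toList := by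
      apply List.takeWhile_eq_self_iff.mpr
      intro c hc
      simp only [bne_iff_ne, ne_eq]
      exact fun hcd => hnot (hcd ▸ hc)
    rw [this, String.ofList_toList]

-- startswith with a 2-char prefix, at the character level
lemma pv_startswith2 (s : String) (a b : Char) (p : String) (hp : p.toList = [a, b]) :
    PySem.Str.startswith s p = true ↔ ∃ t, s.toList = a :: b :: t := by
  show List.isPrefixOf p.toList s.toList = true ↔ _
  rw [hp, List.isPrefixOf_iff_prefix]
  constructor
  · rintro ⟨t, ht⟩
    exact ⟨t, ht.symm⟩
  · rintro ⟨t, ht⟩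
    exact ⟨t, by simp [ht]⟩

lemma pv_startswith1 (s : String) (a : Char) (p : String) (hp : p.toList = [a]) :
    PySem.Str.startswith s p = true ↔ ∃ t, s.toList = a :: t := by
  show List.isPrefixOf p.toList s.toList = true ↔ _
  rw [hp, List.isPrefixOf_iff_prefix]
  constructor
  · rintro ⟨t, ht⟩
    exact ⟨t, ht.symm⟩
  · rintro ⟨t, ht⟩
    exact ⟨t, by simp [ht]⟩

-- ticker[k:] at the character level
lemma pv_slice_drop (s : String) (k : Nat) :
    (PySem.Str.slice s (some (k : Int)) none).toList = s.toList.drop k := by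
  rw [PySem.Str.toList_slice]
  rw [PySem.Chars.slice_eq_listSlice]
  rw [PySem.List.slice_from _ (by positivity : (0 : Int) ≤ (k : Int))]
  simp

-- A's prefix loop computes B's character-test body
lemma pv_strip_eq (s : String) :
    (pvStripPrefixA ["@", "U:", "C:", "D:", "J:", "K:", "H:"] s).toList = pvBodyB s.toList := by
  have l1 : PySem.Str.len "@" = ((1 : Nat) : Int) := rfl
  have l2 : PySem.Str.len "U:" = ((2 : Nat) : Int) := rfl
  have l3 : PySem.Str.len "C:" = ((2 : Nat) : Int) := rfl
  have l4 : PySem.Str.len "D:" = ((2 : Nat) : Int) := rfl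
  have l5 : PySem.Str.len "J:" = ((2 : Nat) : Int) := rfl
  have l6 : PySem.Str.len "K:" = ((2 : Nat) : Int) := rfl
  have l7 : PySem.Str.len "H:" = ((2 : Nat) : Int) := rfl
  simp only [pvStripPrefixA]
  split_ifs with h1 h2 h3 h4 h5 h6 h7
  · obtain ⟨t, ht⟩ := (pv_startswith1 s '@' "@" rfl).mp h1
    rw [l1, pv_slice_drop, ht]
    simp [pvBodyB]
  · obtain ⟨t, ht⟩ := (pv_startswith2 s 'U' ':' "U:" rfl).mp h2
    rw [l2, pv_slice_drop, ht]
    simp [pvBodyB]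
  · obtain ⟨t, ht⟩ := (pv_startswith2 s 'C' ':' "C:" rfl).mp h3
    rw [l3, pv_slice_drop, ht]
    simp [pvBodyB]
  · obtain ⟨t, ht⟩ := (pv_startswith2 s 'D' ':' "D:" rfl).mp h4
    rw [l4, pv_slice_drop, ht]
    simp [pvBodyB]
  · obtain ⟨t, ht⟩ := (pv_startswith2 s 'J' ':' "J:" rfl).mp h5
    rw [l5, pv_slice_drop, ht]
    simp [pvBodyB]
  · obtain ⟨t, ht⟩ := (pv_startswith2 s 'K' ':' "K:" rfl).mp h6
    rw [l6, pv_slice_drop, ht]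
    simp [pvBodyB]
  · obtain ⟨t, ht⟩ := (pv_startswith2 s 'H' ':' "H:" rfl).mp h7
    rw [l7, pv_slice_drop, ht]
    simp [pvBodyB]
  · -- no prefix matched: B's character tests all fail too
    cases hcs : s.toList with
    | nil => simp [pvBodyB]
    | cons c t =>
      by_cases hc : c = '@'
      · exact absurd ((pv_startswith1 s '@' "@" rfl).mpr ⟨t, by rw [hcs, hc]⟩) h1
      cases t with
      | nil => simp [pvBodyB, hc]
      | cons d t' =>
        by_cases hd : d = ':'
        · by_cases hU : c = 'U'
          · exact absurd ((pv_startswith2 s 'U' ':' "U:" rfl).mpr ⟨t', by rw [hcs, hU, hd]⟩) h2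
          by_cases hC : c = 'C'
          · exact absurd ((pv_startswith2 s 'C' ':' "C:" rfl).mpr ⟨t', by rw [hcs, hC, hd]⟩) h3
          by_cases hD : c = 'D'
          · exact absurd ((pv_startswith2 s 'D' ':' "D:" rfl).mpr ⟨t', by rw [hcs, hD, hd]⟩) h4
          by_cases hJ : c = 'J'
          · exact absurd ((pv_startswith2 s 'J' ':' "J:" rfl).mpr ⟨t', by rw [hcs, hJ, hd]⟩) h5
          by_cases hK : c = 'K'
          · exact absurd ((pv_startswith2 s 'K' ':' "K:" rfl).mpr ⟨t', by rw [hcs, hK, hd]⟩) h6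
          by_cases hH : c = 'H'
          · exact absurd ((pv_startswith2 s 'H' ':' "H:" rfl).mpr ⟨t', by rw [hcs, hH, hd]⟩) h7
          simp [pvBodyB, hc, hU, hC, hD, hJ, hK, hH]
        · simp [pvBodyB, hc, hd]

-- ===== VERDICT (by name: the statement is the Claim_ definition above) =====
theorem extract_ticker_symbol_spec : Claim_equal_extract_ticker_symbol := by
  intro ticker _
  unfold Spec_extract_ticker_symbol extract_ticker_symbol extract_ticker_symbol_alt
  rw [pv_dot_part, pv_strip_eq]
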